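-- pv_equiv track=rewrite | github.com/TomSwalens/Devnet | ProjectOdisee/webexgroups.py | make_list_of_groups
-- ===== SOURCE A (Python) =====
-- def make_list_of_groups(member_list):
--     all_groups = []
--     mem = None
--     for rec in member_list:
--         g = rec["group"]
--         if mem != g:
--             all_groups.append(g)
--         mem = g
--     all_groups.pop()
--     return all_groups
-- ===== SOURCE B (Python) =====
-- def _run_keys(rest):
--     # recursive run-length decomposition: first run's key + keys of the remainder
--     if not rest:
--         return []
--     g = rest[0]["group"]
--     i = 1
--     while i < len(rest) and rest[i]["group"] == g:
--         i += 1
--     return [g] + _run_keys(rest[i:])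
--
-- def make_list_of_groups(member_list):
--     keys = _run_keys(member_list)
--     keys.pop()
--     return keys
-- ===== Notes on version B (the rewrite author's own statement) =====
-- stated objective: alternative
-- what changed: Replaces the previous-value accumulator loop with a recursive run-length decomposition that extracts each run's key by skipping its whole run, then pops the last key.
-- outside the precondition, e.g. on make_list_of_groups([]): A raises IndexError, B raises IndexError
import Mathlib
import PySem

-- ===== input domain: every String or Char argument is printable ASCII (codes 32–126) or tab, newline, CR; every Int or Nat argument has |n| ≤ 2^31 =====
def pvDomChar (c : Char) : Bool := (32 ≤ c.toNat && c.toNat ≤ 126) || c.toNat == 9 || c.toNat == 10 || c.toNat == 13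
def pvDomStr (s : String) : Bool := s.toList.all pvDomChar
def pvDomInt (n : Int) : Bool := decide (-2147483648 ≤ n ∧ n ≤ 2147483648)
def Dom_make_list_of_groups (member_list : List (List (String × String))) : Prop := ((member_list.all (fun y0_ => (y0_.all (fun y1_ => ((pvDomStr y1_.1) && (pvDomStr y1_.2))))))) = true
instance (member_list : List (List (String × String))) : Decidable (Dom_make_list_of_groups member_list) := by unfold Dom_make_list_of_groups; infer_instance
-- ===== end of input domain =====

-- B replaces A's previous-value accumulator loop with a recursive run-length
-- decomposition (take each run's key, skip the run); same linear cost.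

-- ===== PORT A =====
-- rec["group"]: first-match lookup in the association list (exact Python dict lookup)
def pvGetGroup (r : List (String × String)) : Option String := (PySem.Dict.mk r).get? "group"

-- A's loop: state = (all_groups, mem); rec["group"] lookup defaulted to "" (Pre_ excludes missing keys)
def pvLoopA : List (List (String × String)) → List String → Option String → List String
  | [], acc, _ => acc
  | r :: rest, acc, mem =>
      let g := (pvGetGroup r).getD ""
      pvLoopA rest (if mem ≠ some g then acc ++ [g] else acc) (some g)

def make_list_of_groups (member_list : List (List (String × String))) : List String :=
  (pvLoopA member_list [] none).dropLast  -- .pop(): Pre_ excludes the empty list, where Python raises IndexError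

-- ===== PORT B =====
-- inner while: skip the elements of the current run
def pvSkipRun (g : String) : List (List (String × String)) → List (List (String × String))
  | [] => []
  | r :: rest => if (pvGetGroup r).getD "" = g then pvSkipRun g rest else r :: rest

theorem pvSkipRun_le (g : String) (xs : List (List (String × String))) :
    (pvSkipRun g xs).length ≤ xs.length := by
  induction xs with
  | nil => simp [pvSkipRun]
  | cons r rest ih =>
      simp only [pvSkipRun]
      split
      · exact le_trans ih (Nat.le_succ _)
      · simp

def pvRunKeys : List (List (String × String)) → List String
  | [] => []
  | r :: rest =>
      let g := (pvGetGroup r).getD ""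
      g :: pvRunKeys (pvSkipRun g rest)
termination_by xs => xs.length
decreasing_by
  exact Nat.lt_succ_of_le (pvSkipRun_le _ _)

def make_list_of_groups_alt (member_list : List (List (String × String))) : List String :=
  (pvRunKeys member_list).dropLast  -- .pop(): Pre_ excludes the empty list, where Python raises IndexError

-- ===== PRECONDITION & SPEC =====
-- Pre_ excludes the empty list (pop() raises IndexError) and records missing the
-- "group" key (rec["group"] raises KeyError); both programs raise there.
def Pre_make_list_of_groups (member_list : List (List (String × String))) : Prop :=
  member_list ≠ [] ∧ ∀ r ∈ member_list, (pvGetGroup r).isSome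

instance (member_list : List (List (String × String))) : Decidable (Pre_make_list_of_groups member_list) := by
  unfold Pre_make_list_of_groups; infer_instance

def pvWitness_make_list_of_groups : (List (List (String × String))) :=
  [[("group", "a")], [("group", "a")], [("group", "b")]]

def Spec_make_list_of_groups (member_list : List (List (String × String))) (out : List String) : Prop := out = make_list_of_groups_alt member_list
instance (member_list : List (List (String × String))) (out : List String) : Decidable (Spec_make_list_of_groups member_list out) := by unfold Spec_make_list_of_groups; infer_instance

-- ===== CLAIM (what is proved, stated in full; the proofs are below) =====
def Claim_equal_make_list_of_groups : Prop := ∀ (member_list : List (List (String × String))), Dom_make_list_of_groups member_list → Pre_make_list_of_groups member_list → Spec_make_list_of_groups member_list (make_list_of_groups member_list)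

-- ===== LEMMAS AND PROOFS =====

theorem pvRunKeys_cons (r : List (String × String)) (rest : List (List (String × String))) :
    pvRunKeys (r :: rest) = (pvGetGroup r).getD "" :: pvRunKeys (pvSkipRun ((pvGetGroup r).getD "") rest) := by
  rw [pvRunKeys.eq_def]

-- A's loop with mem = some g accumulates exactly the run keys after skipping a leading g-run
theorem pvLoopA_some (xs : List (List (String × String))) (g : String) (acc : List String) :
    pvLoopA xs acc (some g) = acc ++ pvRunKeys (pvSkipRun g xs) := by
  induction xs generalizing g acc with
  | nil => simp [pvLoopA, pvSkipRun, pvRunKeys]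
  | cons r rest ih =>
      by_cases h : (pvGetGroup r).getD "" = g
      · simp [pvLoopA, pvSkipRun, h, ih]
      · simp only [pvLoopA]
        rw [if_pos (fun e => h (Option.some.inj e).symm), ih]
        simp only [pvSkipRun, if_neg h]
        rw [pvRunKeys_cons]
        simp

theorem pvLoopA_none (xs : List (List (String × String))) :
    pvLoopA xs [] none = pvRunKeys xs := by
  cases xs with
  | nil => simp [pvLoopA, pvRunKeys]
  | cons r rest =>
      simp only [pvLoopA, pvRunKeys]
      rw [if_pos (by simp), pvLoopA_some]
      simp

-- ===== VERDICT (by name: the statement is the Claim_ definition above) =====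
theorem make_list_of_groups_spec : Claim_equal_make_list_of_groups := by
  intro ml _ _
  unfold Spec_make_list_of_groups make_list_of_groups make_list_of_groups_alt
  rw [pvLoopA_none]
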